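-- pv_equiv track=rewrite | github.com/henryhardigan/contact-alignment | scripts/scan_db200k_accessibility.py | coarse_class_labels
-- ===== SOURCE A (Python) =====
-- COARSE_CLASSES = {
--     "acidic": set("DE"),
--     "basic": set("KRH"),
--     "polar": set("NQST"),
--     "gp": set("GP"),
--     "hydrophobic": set("AILMFWVYC"),
-- }
--
-- def coarse_class_labels(window: str) -> list[str]:
--     labels: list[str] = []
--     for aa in window:
--         for label, residues in COARSE_CLASSES.items():
--             if aa in residues:
--                 labels.append(label)
--                 break
--         else:
--             labels.append("other")
--     return labels
-- ===== SOURCE B (Python) =====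
-- CLASS_STRINGS = {
--     "acidic": "DE",
--     "basic": "KRH",
--     "polar": "NQST",
--     "gp": "GP",
--     "hydrophobic": "AILMFWVYC",
-- }
--
-- # flat lookup table built once: residue char -> coarse-class label
-- RESIDUE_TO_CLASS = {aa: label for label, s in CLASS_STRINGS.items() for aa in s}
--
-- def coarse_class_labels(window: str) -> list[str]:
--     return [RESIDUE_TO_CLASS.get(aa, "other") for aa in window]
-- ===== Notes on version B (the rewrite author's own statement) =====
-- stated objective: idiomatic
-- what changed: Replaces the per-character 5-way scan over COARSE_CLASSES (for/else with break) by a flat residue->label dictionary built once, so each character is classified by a single lookup in a comprehension.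
import Mathlib
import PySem

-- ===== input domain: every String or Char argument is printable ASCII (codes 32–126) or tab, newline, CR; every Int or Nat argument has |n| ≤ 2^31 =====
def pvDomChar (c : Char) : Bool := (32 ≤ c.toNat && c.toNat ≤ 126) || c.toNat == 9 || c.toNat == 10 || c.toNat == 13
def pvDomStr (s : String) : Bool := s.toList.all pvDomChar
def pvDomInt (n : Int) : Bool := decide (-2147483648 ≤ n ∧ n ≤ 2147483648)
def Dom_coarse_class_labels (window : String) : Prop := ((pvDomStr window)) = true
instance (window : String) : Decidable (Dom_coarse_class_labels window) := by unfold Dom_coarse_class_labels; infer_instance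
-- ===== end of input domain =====

-- B builds a flat residue->label dictionary once and classifies each character by one lookup,
-- instead of A's per-character scan over the five class sets.

-- ===== PORT A =====
def COARSE_CLASSES : PySem.Dict String (PySem.Set Char) :=
  PySem.Dict.ofList
    [("acidic", PySem.Set.ofList "DE".toList),
     ("basic", PySem.Set.ofList "KRH".toList),
     ("polar", PySem.Set.ofList "NQST".toList),
     ("gp", PySem.Set.ofList "GP".toList),
     ("hydrophobic", PySem.Set.ofList "AILMFWVYC".toList)]

-- the inner 'for label, residues in COARSE_CLASSES.items(): if aa in residues: … break / else: "other"'
def innerScanA (aa : Char) : List (String × PySem.Set Char) → String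
  | [] => "other"
  | (label, residues) :: rest =>
      if PySem.Set.contains residues aa then label else innerScanA aa rest

def coarse_class_labels (window : String) : List String :=
  window.toList.foldl (fun labels aa => labels ++ [innerScanA aa COARSE_CLASSES.items]) []

-- ===== PORT B =====
def CLASS_STRINGS : PySem.Dict String String :=
  PySem.Dict.ofList
    [("acidic", "DE"), ("basic", "KRH"), ("polar", "NQST"),
     ("gp", "GP"), ("hydrophobic", "AILMFWVYC")]

-- {aa: label for label, s in CLASS_STRINGS.items() for aa in s}
def RESIDUE_TO_CLASS : PySem.Dict Char String :=
  CLASS_STRINGS.items.foldl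
    (fun d p => p.2.toList.foldl (fun d aa => d.insert aa p.1) d)
    PySem.Dict.empty

def coarse_class_labels_alt (window : String) : List String :=
  window.toList.map (fun aa => RESIDUE_TO_CLASS.getD aa "other")

-- ===== PRECONDITION & SPEC =====
def Spec_coarse_class_labels (window : String) (out : List String) : Prop := out = coarse_class_labels_alt window
instance (window : String) (out : List String) : Decidable (Spec_coarse_class_labels window out) := by unfold Spec_coarse_class_labels; infer_instance

-- ===== CLAIM (what is proved, stated in full; the proofs are below) =====
def Claim_equal_coarse_class_labels : Prop := ∀ (window : String), Dom_coarse_class_labels window → Spec_coarse_class_labels window (coarse_class_labels window)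

-- ===== LEMMAS AND PROOFS =====

lemma items_CC :
    COARSE_CLASSES.items =
      [("acidic", ['D','E']), ("basic", ['K','R','H']), ("polar", ['N','Q','S','T']),
       ("gp", ['G','P']), ("hydrophobic", ['A','I','L','M','F','W','V','Y','C'])] := by decide

lemma rtc_eq : RESIDUE_TO_CLASS = PySem.Dict.mk [('D',"acidic"),('E',"acidic"),('K',"basic"),('R',"basic"),('H',"basic"),('N',"polar"),('Q',"polar"),('S',"polar"),('T',"polar"),('G',"gp"),('P',"gp"),('A',"hydrophobic"),('I',"hydrophobic"),('L',"hydrophobic"),('M',"hydrophobic"),('F',"hydrophobic"),('W',"hydrophobic"),('V',"hydrophobic"),('Y',"hydrophobic"),('C',"hydrophobic")] := by decide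

lemma classify_eq (aa : Char) :
    innerScanA aa COARSE_CLASSES.items = RESIDUE_TO_CLASS.getD aa "other" := by
  by_cases h0 : aa = 'D'
  · subst h0; decide
  by_cases h1 : aa = 'E'
  · subst h1; decide
  by_cases h2 : aa = 'K'
  · subst h2; decide
  by_cases h3 : aa = 'R'
  · subst h3; decide
  by_cases h4 : aa = 'H'
  · subst h4; decide
  by_cases h5 : aa = 'N'
  · subst h5; decide
  by_cases h6 : aa = 'Q'
  · subst h6; decide
  by_cases h7 : aa = 'S'
  · subst h7; decide
  by_cases h8 : aa = 'T'
  · subst h8; decide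
  by_cases h9 : aa = 'G'
  · subst h9; decide
  by_cases h10 : aa = 'P'
  · subst h10; decide
  by_cases h11 : aa = 'A'
  · subst h11; decide
  by_cases h12 : aa = 'I'
  · subst h12; decide
  by_cases h13 : aa = 'L'
  · subst h13; decide
  by_cases h14 : aa = 'M'
  · subst h14; decide
  by_cases h15 : aa = 'F'
  · subst h15; decide
  by_cases h16 : aa = 'W'
  · subst h16; decide
  by_cases h17 : aa = 'V'
  · subst h17; decide
  by_cases h18 : aa = 'Y'
  · subst h18; decide
  by_cases h19 : aa = 'C'
  · subst h19; decide
  rw [items_CC, rtc_eq]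
  simp [innerScanA, PySem.Dict.getD, PySem.Dict.get?, h0, Ne.symm h0, h1, Ne.symm h1, h2, Ne.symm h2, h3, Ne.symm h3, h4, Ne.symm h4, h5, Ne.symm h5, h6, Ne.symm h6, h7, Ne.symm h7, h8, Ne.symm h8, h9, Ne.symm h9, h10, Ne.symm h10, h11, Ne.symm h11, h12, Ne.symm h12, h13, Ne.symm h13, h14, Ne.symm h14, h15, Ne.symm h15, h16, Ne.symm h16, h17, Ne.symm h17, h18, Ne.symm h18, h19, Ne.symm h19]

lemma foldl_append_map {α β : Type} (f : α → β) (xs : List α) (acc : List β) :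
    xs.foldl (fun l a => l ++ [f a]) acc = acc ++ xs.map f := by
  induction xs generalizing acc with
  | nil => simp
  | cons x xs ih => simp [ih]

-- ===== VERDICT (by name: the statement is the Claim_ definition above) =====
theorem coarse_class_labels_spec : Claim_equal_coarse_class_labels := by
  intro window _
  unfold Spec_coarse_class_labels coarse_class_labels coarse_class_labels_alt
  rw [foldl_append_map]
  simp [classify_eq]
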